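-- pv_equiv track=rewrite | github.com/flaska99/backjoon_Code_Solving | 프로그래머스/2/86971. 전력망을 둘로 나누기/전력망을 둘로 나누기.py | bfs
-- ===== SOURCE A (Python) =====
-- from collections import deque
--
-- def bfs(graph, n):
--     visited = [False] * (n+1)
--     que = deque()
--     que.append(1)
--     visited[1] = True
--     count = 1
--
--     while que:
--         cur = que.popleft()
--         for next in graph[cur]:
--             if not visited[next]:
--                 visited[next] = True
--                 que.append(next)
--                 count += 1
--     return count
-- ===== SOURCE B (Python) =====
-- def bfs(graph, n):
--     reach = {1}
--     frontier = {1}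
--     while frontier:
--         nxt = set()
--         for u in frontier:
--             for v in graph[u]:
--                 if v not in reach:
--                     reach.add(v)
--                     nxt.add(v)
--         frontier = nxt
--     return len(reach)
-- ===== Notes on version B (the rewrite author's own statement) =====
-- stated objective: alternative
-- what changed: Replaces the indexed visited-array plus FIFO-queue BFS by a level-synchronous frontier iteration over Python sets (no visited array, no queue, no running counter), returning the size of the reachable set.
-- outside the precondition, e.g. on bfs({1: [0], 0: [-1]}, 1): A returns 2, B raises KeyError
import Mathlib
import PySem

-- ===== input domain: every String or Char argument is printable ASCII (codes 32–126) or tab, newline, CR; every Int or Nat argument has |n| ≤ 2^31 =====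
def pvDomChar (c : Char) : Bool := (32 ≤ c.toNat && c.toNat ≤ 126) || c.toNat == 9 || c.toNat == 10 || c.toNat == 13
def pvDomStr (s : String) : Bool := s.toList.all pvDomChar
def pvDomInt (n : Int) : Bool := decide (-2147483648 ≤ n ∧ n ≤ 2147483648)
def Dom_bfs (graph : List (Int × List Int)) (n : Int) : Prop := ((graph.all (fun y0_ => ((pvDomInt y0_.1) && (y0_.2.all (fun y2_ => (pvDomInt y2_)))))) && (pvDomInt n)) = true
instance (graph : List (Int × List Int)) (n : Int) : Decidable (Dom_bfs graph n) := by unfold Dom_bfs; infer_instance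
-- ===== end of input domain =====

-- B replaces the indexed visited-array + FIFO-queue BFS by a level-synchronous
-- frontier-set iteration returning the size of the reachable set (objective:
-- alternative, same cost).

-- Helpers shared by both ports (exact on Pre_bfs, see comments):
-- `graph[cur]` on a dict = first-match lookup; Python raises KeyError when the key is
-- absent — Pre_bfs guarantees every looked-up key is present, so `.getD []` is exact there.
def pvAdj (g : List (Int × List Int)) (c : Int) : List Int := (g.lookup c).getD []

-- ===== PORT A =====
-- `visited[i]` read: Python wraps negative indices and raises IndexError out of range;
-- Pre_bfs keeps every index in 0..n, where this is exact.
def pvSeen (v : List Bool) (i : Int) : Bool :=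
  if h : 0 ≤ i ∧ i.toNat < v.length then v[i.toNat] else true

-- `visited[i] = True`: exact for in-range non-negative indices (guaranteed by Pre_bfs).
def pvMark (v : List Bool) (i : Int) : List Bool :=
  if 0 ≤ i ∧ i.toNat < v.length then v.set i.toNat true else v

-- body of A's `for next in graph[cur]:` loop, acting on (visited, que, count)
def bfsStep (s : List Bool × List Int × Int) (nxt : Int) : List Bool × List Int × Int :=
  if pvSeen s.1 nxt then s else (pvMark s.1 nxt, s.2.1 ++ [nxt], s.2.2 + 1)

-- measure lemmas cited by `decreasing_by` of A's loop
theorem count_false_set_true :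
    ∀ (v : List Bool) (j : Nat), j < v.length → v[j]! = false →
      (v.set j true).count false + 1 = v.count false := by
  intro v
  induction v with
  | nil => intro j h; simp at h
  | cons a t ih =>
    intro j hj hv
    cases j with
    | zero =>
      simp at hv
      simp [hv]
    | succ m =>
      have hm : m < t.length := by simpa using hj
      have hv' : t[m]! = false := by
        simpa [List.getElem!_cons_succ] using hv
      have := ih m hm hv'
      simp [List.count_cons]
      omega

theorem bfsStep_measure (s : List Bool × List Int × Int) (x : Int) :
    2 * (bfsStep s x).1.count false + (bfsStep s x).2.1.length
      ≤ 2 * s.1.count false + s.2.1.length := by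
  unfold bfsStep
  split
  · exact le_refl _
  · rename_i hseen
    unfold pvSeen at hseen
    split at hseen
    · rename_i hr
      have hv : s.1[x.toNat]! = false := by
        have : s.1[x.toNat] = false := by simpa using hseen
        simp [List.getElem!_eq_getElem?_getD, List.getElem?_eq_getElem hr.2, this]
      have hc := count_false_set_true s.1 x.toNat hr.2 hv
      simp only [pvMark, if_pos hr]
      simp
      omega
    · simp at hseen

theorem foldl_bfsStep_measure :
    ∀ (l : List Int) (s : List Bool × List Int × Int),
      2 * (l.foldl bfsStep s).1.count false + (l.foldl bfsStep s).2.1.length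
        ≤ 2 * s.1.count false + s.2.1.length := by
  intro l
  induction l with
  | nil => intro s; simp
  | cons x t ih =>
    intro s
    calc 2 * ((x :: t).foldl bfsStep s).1.count false + ((x :: t).foldl bfsStep s).2.1.length
        = 2 * (t.foldl bfsStep (bfsStep s x)).1.count false + (t.foldl bfsStep (bfsStep s x)).2.1.length := by simp [List.foldl]
      _ ≤ 2 * (bfsStep s x).1.count false + (bfsStep s x).2.1.length := ih _
      _ ≤ _ := bfsStep_measure s x

-- A's `while que:` loop (queue = list, pop at the front, append at the back)
def bfsLoop (g : List (Int × List Int)) : List Bool → List Int → Int → Int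
  | _, [], count => count
  | visited, cur :: rest, count =>
    let s := (pvAdj g cur).foldl bfsStep (visited, rest, count)
    bfsLoop g s.1 s.2.1 s.2.2
  termination_by v q _ => 2 * v.count false + q.length
  decreasing_by
    have := foldl_bfsStep_measure (pvAdj g cur) (visited, rest, count)
    simp at this ⊢
    omega

def bfs (graph : List (Int × List Int)) (n : Int) : Int :=
  let visited := List.replicate (n + 1).toNat false   -- [False] * (n+1)
  let visited := pvMark visited 1                      -- visited[1] = True
  bfsLoop graph visited [1] 1

-- ===== PORT B =====
-- body of B's inner `if v not in reach: reach.add(v); nxt.add(v)`, acting on (reach, nxt)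
def bStepV (s : List Int × List Int) (v : Int) : List Int × List Int :=
  if PySem.Set.contains s.1 v then s else (PySem.Set.add s.1 v, PySem.Set.add s.2 v)

-- one round of B's `while frontier:` body: builds nxt from scratch, grows reach
def bRound (g : List (Int × List Int)) (reach frontier : List Int) : List Int × List Int :=
  frontier.foldl (fun s u => (pvAdj g u).foldl bStepV s) (reach, [])

-- B's `while frontier:` loop; the fuel only makes the recursion structural:
-- reach is a nodup set growing inside a fixed universe, so the supplied fuel
-- (|all adjacency entries| + 2) is never exhausted (proved in the lemmas below).
def bLoop (g : List (Int × List Int)) : Nat → List Int → List Int → List Int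
  | 0, reach, _ => reach
  | fuel + 1, reach, frontier =>
    if frontier = [] then reach
    else
      let s := bRound g reach frontier
      bLoop g fuel s.1 s.2

def bfs_alt (graph : List (Int × List Int)) (n : Int) : Int :=
  ((bLoop graph ((graph.flatMap (fun p => p.2)).length + 2) [1] [1]).length : Int)

-- ===== PRECONDITION & SPEC =====
-- the set of nodes the search can discover: closure of {1} under the adjacency lists,
-- computed by iterating a monotone grow step until it provably reaches its fixpoint
def pvGrow (g : List (Int × List Int)) (S : List Int) : List Int :=
  (S.flatMap (pvAdj g)).foldl PySem.Set.add S

def pvReach (g : List (Int × List Int)) : List Int :=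
  (pvGrow g)^[(g.flatMap (fun p => p.2)).length + 1] [1]

-- Pre_bfs excludes exactly the inputs touching A's exceptional/accidental corners:
-- n < 1 (IndexError on visited[1]); a discoverable node with no dict entry (KeyError)
-- or with an index outside 0..n (IndexError, or accidental aliasing through Python's
-- negative-index wraparound, which A only survives by accident).  Unreachable junk in
-- the dict is allowed.
def Pre_bfs (graph : List (Int × List Int)) (n : Int) : Prop :=
  1 ≤ n ∧ (graph.lookup 1).isSome = true ∧
    ∀ x ∈ pvReach graph, 0 ≤ x ∧ x < n + 1 ∧ (graph.lookup x).isSome = true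
instance (graph : List (Int × List Int)) (n : Int) : Decidable (Pre_bfs graph n) := by
  unfold Pre_bfs; infer_instance

def pvWitness_bfs : (List (Int × List Int)) × Int := ([(1, [2, 3]), (2, [1]), (3, [3])], 3)

def Spec_bfs (graph : List (Int × List Int)) (n : Int) (out : Int) : Prop := out = bfs_alt graph n
instance (graph : List (Int × List Int)) (n : Int) (out : Int) : Decidable (Spec_bfs graph n out) := by unfold Spec_bfs; infer_instance

-- ===== CLAIM (what is proved, stated in full; the proofs are below) =====
def Claim_equal_bfs : Prop := ∀ (graph : List (Int × List Int)) (n : Int), Dom_bfs graph n → Pre_bfs graph n → Spec_bfs graph n (bfs graph n)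

-- ===== LEMMAS AND PROOFS =====

theorem pvMark_length (v : List Bool) (i : Int) : (pvMark v i).length = v.length := by
  unfold pvMark; split <;> simp

-- x is a marked (visited) node of the array v
def MkP (v : List Bool) (x : Int) : Prop :=
  0 ≤ x ∧ x.toNat < v.length ∧ v.getD x.toNat false = true

-- reachability from node 1 along adjacency lists
def ReachP (g : List (Int × List Int)) (x : Int) : Prop :=
  Relation.ReflTransGen (fun a b => b ∈ pvAdj g a) 1 x

-- the visited array A's search ends with: marked = reachable
def FinalChar (g : List (Int × List Int)) (n : Int) (v : List Bool) : Prop :=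
  v.length = (n + 1).toNat ∧ ∀ x, MkP v x ↔ ReachP g x

-- every neighbour of a discoverable node is in range (consequence of Pre_bfs)
def AdjOK (g : List (Int × List Int)) (n : Int) : Prop :=
  ∀ c, ReachP g c → ∀ y ∈ pvAdj g c, 0 ≤ y ∧ y < n + 1

-- worklist invariant for A's queue loop
def INV (g : List (Int × List Int)) (n : Int) (v : List Bool) (w : List Int) : Prop :=
  v.length = (n + 1).toNat
  ∧ (∀ y ∈ w, MkP v y)
  ∧ (∀ x, MkP v x → ReachP g x)
  ∧ (∀ x, MkP v x → x ∉ w → ∀ y ∈ pvAdj g x, MkP v y)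
  ∧ MkP v 1

theorem lookup_mem :
    ∀ (g : List (Int × List Int)) (c : Int) (l : List Int),
      g.lookup c = some l → (c, l) ∈ g := by
  intro g
  induction g with
  | nil => intro c l h; simp [List.lookup] at h
  | cons p t ih =>
    intro c l h
    obtain ⟨k, v⟩ := p
    rw [List.lookup_cons] at h
    cases hk : (c == k) with
    | true =>
      rw [hk] at h
      have hkc : c = k := by simpa using hk
      have hvl : v = l := by simpa using h
      subst hkc; subst hvl
      exact List.mem_cons_self
    | false =>
      rw [hk] at h
      exact List.mem_cons_of_mem _ (ih c l h)

theorem foldl_add_append (l : List Int) :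
    ∀ acc : List Int, ∃ e, l.foldl PySem.Set.add acc = acc ++ e := by
  induction l with
  | nil => intro acc; exact ⟨[], by simp⟩
  | cons x t ih =>
    intro acc
    by_cases hc : x ∈ acc
    · obtain ⟨e, he⟩ := ih acc
      refine ⟨e, ?_⟩
      rw [List.foldl_cons]
      have hadd : PySem.Set.add acc x = acc := by
        simp [PySem.Set.add, PySem.Set.contains, hc]
      rw [hadd, he]
    · obtain ⟨e, he⟩ := ih (acc ++ [x])
      refine ⟨x :: e, ?_⟩
      rw [List.foldl_cons]
      have hadd : PySem.Set.add acc x = acc ++ [x] := by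
        simp [PySem.Set.add, PySem.Set.contains, hc]
      rw [hadd, he]
      simp

theorem mem_foldl_add_left (l : List Int) (acc : List Int) (a : Int) (h : a ∈ acc) :
    a ∈ l.foldl PySem.Set.add acc := by
  obtain ⟨e, he⟩ := foldl_add_append l acc
  rw [he]
  exact List.mem_append_left _ h

theorem mem_foldl_add_right (l : List Int) :
    ∀ (acc : List Int) (a : Int), a ∈ l → a ∈ l.foldl PySem.Set.add acc := by
  induction l with
  | nil => intro acc a h; simp at h
  | cons x t ih =>
    intro acc a h
    rcases List.mem_cons.mp h with rfl | h'
    · rw [List.foldl_cons]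
      apply mem_foldl_add_left
      unfold PySem.Set.add
      split
      · rename_i hc; simpa [PySem.Set.contains] using hc
      · simp
    · rw [List.foldl_cons]
      exact ih _ a h'

theorem mem_foldl_add_inv (l : List Int) :
    ∀ (acc : List Int) (a : Int), a ∈ l.foldl PySem.Set.add acc → a ∈ acc ∨ a ∈ l := by
  induction l with
  | nil => intro acc a h; exact Or.inl (by simpa using h)
  | cons x t ih =>
    intro acc a h
    rcases ih _ a h with h' | h'
    · rcases (by simpa [PySem.Set.mem_add] using h' : a ∈ acc ∨ a = x) with h'' | h''
      · exact Or.inl h''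
      · exact Or.inr (by rw [h'']; exact List.mem_cons_self)
    · exact Or.inr (List.mem_cons_of_mem _ h')

theorem nodup_foldl_add (l : List Int) :
    ∀ acc : List Int, acc.Nodup → (l.foldl PySem.Set.add acc).Nodup := by
  induction l with
  | nil => intro acc h; simpa using h
  | cons x t ih =>
    intro acc h
    apply ih
    unfold PySem.Set.add
    split
    · exact h
    · rename_i hc
      have hx : x ∉ acc := by
        intro hm
        exact hc (by simpa [PySem.Set.contains] using hm)
      simp [List.nodup_append, h]
      exact fun a ha hax => hx (hax ▸ ha)

theorem adj_sub_flat (g : List (Int × List Int)) (a y : Int) (h : y ∈ pvAdj g a) :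
    y ∈ g.flatMap (fun p => p.2) := by
  unfold pvAdj at h
  cases hl : g.lookup a with
  | none => simp [hl] at h
  | some l =>
    rw [hl] at h
    exact List.mem_flatMap.mpr ⟨(a, l), lookup_mem g _ _ hl, by simpa using h⟩

theorem grow_sub_left (g : List (Int × List Int)) (S : List Int) (a : Int) (h : a ∈ S) :
    a ∈ pvGrow g S := mem_foldl_add_left _ _ _ h

theorem grow_mem_adj (g : List (Int × List Int)) (S : List Int) (x y : Int)
    (hx : x ∈ S) (hy : y ∈ pvAdj g x) : y ∈ pvGrow g S :=
  mem_foldl_add_right _ _ _ (List.mem_flatMap.mpr ⟨x, hx, hy⟩)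

theorem grow_inv (g : List (Int × List Int)) (S : List Int) (z : Int)
    (h : z ∈ pvGrow g S) : z ∈ S ∨ z ∈ g.flatMap (fun p => p.2) := by
  rcases mem_foldl_add_inv _ _ _ h with h' | h'
  · exact Or.inl h'
  · obtain ⟨x, _, hz⟩ := List.mem_flatMap.mp h'
    exact Or.inr (adj_sub_flat g x z hz)

theorem grow_nodup (g : List (Int × List Int)) (S : List Int) (h : S.Nodup) :
    (pvGrow g S).Nodup := nodup_foldl_add _ _ h

theorem grow_append (g : List (Int × List Int)) (S : List Int) :
    ∃ e, pvGrow g S = S ++ e := foldl_add_append _ _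

theorem iterate_fix (g : List (Int × List Int)) (S : List Int) (h : pvGrow g S = S) :
    ∀ m, (pvGrow g)^[m] S = S := by
  intro m
  induction m with
  | zero => simp
  | succ k ih => rw [Function.iterate_succ_apply', ih, h]

theorem iter_nodup (g : List (Int × List Int)) :
    ∀ k, ((pvGrow g)^[k] [1]).Nodup := by
  intro k
  induction k with
  | zero => simp
  | succ m ih => rw [Function.iterate_succ_apply']; exact grow_nodup g _ ih

theorem iter_sub_univ (g : List (Int × List Int)) :
    ∀ k, ∀ z ∈ (pvGrow g)^[k] [1], z ∈ (1 : Int) :: g.flatMap (fun p => p.2) := by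
  intro k
  induction k with
  | zero =>
    intro z hz
    simp at hz
    exact List.mem_cons.mpr (Or.inl hz)
  | succ m ih =>
    intro z hz
    rw [Function.iterate_succ_apply'] at hz
    rcases grow_inv g _ z hz with h | h
    · exact ih z h
    · exact List.mem_cons_of_mem _ h

theorem iter_len (g : List (Int × List Int)) (k : Nat) :
    ((pvGrow g)^[k] [1]).length ≤ (g.flatMap (fun p => p.2)).length + 1 := by
  have h1 := iter_nodup g k
  have h2 : (pvGrow g)^[k] [1] ⊆ (1 : Int) :: g.flatMap (fun p => p.2) := by
    intro z hz
    exact iter_sub_univ g k z hz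
  have := (h1.subperm h2).length_le
  simpa using this

theorem pvReach_fix (g : List (Int × List Int)) : pvGrow g (pvReach g) = pvReach g := by
  set N := (g.flatMap (fun p => p.2)).length + 1 with hN
  have hex : ∃ k, k ≤ N ∧ pvGrow g ((pvGrow g)^[k] [1]) = (pvGrow g)^[k] [1] := by
    by_contra hall
    push_neg at hall
    have hgrow : ∀ k, k ≤ N → k + 1 ≤ ((pvGrow g)^[k] [1]).length := by
      intro k
      induction k with
      | zero => intro _; simp
      | succ m ih =>
        intro hm
        have hmN : m ≤ N := by omega
        obtain ⟨e, he⟩ := grow_append g ((pvGrow g)^[m] [1])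
        have hne : e ≠ [] := by
          intro h0
          exact hall m hmN (by rw [he, h0, List.append_nil])
        have := ih hmN
        rw [Function.iterate_succ_apply', he]
        have : 1 ≤ e.length := List.length_pos_iff.mpr hne
        simp only [List.length_append]
        omega
    have h1 := hgrow N (le_refl N)
    have h2 := iter_len g N
    omega
  obtain ⟨k, hk, hfix⟩ := hex
  have hNk : N - k + k = N := by omega
  have hstable : (pvGrow g)^[N] [1] = (pvGrow g)^[k] [1] := by
    rw [← hNk, Function.iterate_add_apply]
    exact iterate_fix g _ hfix _
  show pvGrow g ((pvGrow g)^[N] [1]) = (pvGrow g)^[N] [1]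
  rw [hstable, hfix]

theorem pvReach_one (g : List (Int × List Int)) : (1 : Int) ∈ pvReach g := by
  unfold pvReach
  generalize (g.flatMap (fun p => p.2)).length + 1 = k
  induction k with
  | zero => simp
  | succ m ih => rw [Function.iterate_succ_apply']; exact grow_sub_left g _ _ ih

theorem pvReach_closed (g : List (Int × List Int)) (x y : Int)
    (hx : x ∈ pvReach g) (hy : y ∈ pvAdj g x) : y ∈ pvReach g := by
  rw [← pvReach_fix g]
  exact grow_mem_adj g _ x y hx hy

theorem reach_sub (g : List (Int × List Int)) (x : Int) (h : ReachP g x) :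
    x ∈ pvReach g := by
  induction h with
  | refl => exact pvReach_one g
  | tail _ hstep ih => exact pvReach_closed g _ _ ih hstep

theorem pre_adjOK (g : List (Int × List Int)) (n : Int) (h : Pre_bfs g n) : AdjOK g n := by
  intro c hc y hy
  have hyr : ReachP g y := Relation.ReflTransGen.tail hc hy
  have := h.2.2 y (reach_sub g y hyr)
  exact ⟨this.1, this.2.1⟩

theorem mkP_mark_mono (v : List Bool) (i : Int) (x : Int) (h : MkP v x) : MkP (pvMark v i) x := by
  obtain ⟨h0, hlt, hval⟩ := h
  refine ⟨h0, by rwa [pvMark_length], ?_⟩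
  unfold pvMark
  split
  · rename_i hc
    rcases eq_or_ne i.toNat x.toNat with he | hne
    · have hix : i = x := by omega
      subst hix
      rw [List.getD_eq_getElem?_getD, List.getElem?_set_self hlt]
      simp
    · rw [List.getD_eq_getElem?_getD, List.getElem?_set_ne hne, ← List.getD_eq_getElem?_getD]
      exact hval
  · exact hval

theorem mkP_mark_self (v : List Bool) (i : Int) (h0 : 0 ≤ i) (hlt : i.toNat < v.length) :
    MkP (pvMark v i) i := by
  refine ⟨h0, by rwa [pvMark_length], ?_⟩
  unfold pvMark
  rw [if_pos ⟨h0, hlt⟩]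
  simp [List.getD_eq_getElem?_getD, List.getElem?_set_self, hlt]

theorem mkP_mark_inv (v : List Bool) (i : Int) (x : Int) (h : MkP (pvMark v i) x) :
    MkP v x ∨ x = i := by
  obtain ⟨h0, hlt, hval⟩ := h
  rw [pvMark_length] at hlt
  unfold pvMark at hval
  split at hval
  · rename_i hc
    rcases eq_or_ne x.toNat i.toNat with he | hne
    · right; omega
    · left
      refine ⟨h0, hlt, ?_⟩
      rwa [List.getD_eq_getElem?_getD, List.getElem?_set_ne (Ne.symm hne),
        ← List.getD_eq_getElem?_getD] at hval
  · exact Or.inl ⟨h0, hlt, hval⟩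

theorem pvSeen_false (v : List Bool) (x : Int) (h : pvSeen v x = false) :
    0 ≤ x ∧ x.toNat < v.length ∧ ¬ MkP v x := by
  unfold pvSeen at h
  split at h
  · rename_i hr
    refine ⟨hr.1, hr.2, ?_⟩
    intro ⟨_, _, hval⟩
    rw [List.getD_eq_getElem?_getD, List.getElem?_eq_getElem hr.2] at hval
    simp at hval
    rw [hval] at h
    simp at h
  · simp at h

theorem count_true_mark (v : List Bool) (x : Int) (h : pvSeen v x = false) :
    (pvMark v x).count true = v.count true + 1 := by
  obtain ⟨h0, hlt, hmk⟩ := pvSeen_false v x h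
  have hval : v[x.toNat]! = false := by
    by_contra hne
    exact hmk ⟨h0, hlt, by
      rw [List.getD_eq_getElem?_getD, List.getElem?_eq_getElem hlt]
      simp [List.getElem!_eq_getElem?_getD, List.getElem?_eq_getElem hlt] at hne
      simpa using hne⟩
  unfold pvMark
  rw [if_pos ⟨h0, hlt⟩]
  have h1 := count_false_set_true v x.toNat hlt hval
  have h2 : (v.set x.toNat true).count true + (v.set x.toNat true).count false
      = (v.set x.toNat true).length := by
    have := List.count_true_add_count_false (v.set x.toNat true)
    simpa using this
  have h3 : v.count true + v.count false = v.length := by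
    simpa using List.count_true_add_count_false v
  have h4 : (v.set x.toNat true).length = v.length := by simp
  omega

-- combined specification of folding A's step function over one adjacency list
theorem foldA_spec :
    ∀ (l : List Int) (v : List Bool) (q : List Int) (c : Int),
      (l.foldl bfsStep (v, q, c)).1.length = v.length
      ∧ (∀ x, MkP v x → MkP (l.foldl bfsStep (v, q, c)).1 x)
      ∧ (∀ y ∈ l, 0 ≤ y → y.toNat < v.length → MkP (l.foldl bfsStep (v, q, c)).1 y)
      ∧ (∀ y ∈ q, y ∈ (l.foldl bfsStep (v, q, c)).2.1)
      ∧ (∀ y ∈ (l.foldl bfsStep (v, q, c)).2.1, y ∈ q ∨ y ∈ l)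
      ∧ ((∀ y ∈ q, MkP v y) → ∀ y ∈ (l.foldl bfsStep (v, q, c)).2.1,
            MkP (l.foldl bfsStep (v, q, c)).1 y)
      ∧ (∀ x, MkP (l.foldl bfsStep (v, q, c)).1 x →
            MkP v x ∨ x ∈ (l.foldl bfsStep (v, q, c)).2.1)
      ∧ (c = (v.count true : Int) →
            (l.foldl bfsStep (v, q, c)).2.2 = ((l.foldl bfsStep (v, q, c)).1.count true : Int)) := by
  intro l
  induction l with
  | nil =>
    intro v q c
    simp
    tauto
  | cons a t ih =>
    intro v q c
    simp only [List.foldl]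
    by_cases hs : pvSeen v a = true
    · have hstep : bfsStep (v, q, c) a = (v, q, c) := by simp [bfsStep, hs]
      rw [hstep]
      obtain ⟨i1, i2, i3, i4, i5, i6, i7, i8⟩ := ih v q c
      refine ⟨i1, i2, ?_, i4, ?_, i6, i7, i8⟩
      · intro y hy hy0 hylt
        rcases List.mem_cons.mp hy with rfl | hy'
        · apply i2
          unfold pvSeen at hs
          rw [dif_pos ⟨hy0, hylt⟩] at hs
          exact ⟨hy0, hylt, by
            rw [List.getD_eq_getElem?_getD, List.getElem?_eq_getElem hylt]; simpa using hs⟩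
        · exact i3 y hy' hy0 hylt
      · intro y hy
        rcases i5 y hy with h | h
        · exact Or.inl h
        · exact Or.inr (List.mem_cons_of_mem a h)
    · simp at hs
      have hstep : bfsStep (v, q, c) a = (pvMark v a, q ++ [a], c + 1) := by
        simp [bfsStep, hs]
      rw [hstep]
      obtain ⟨h0, hlt, _⟩ := pvSeen_false v a hs
      obtain ⟨i1, i2, i3, i4, i5, i6, i7, i8⟩ := ih (pvMark v a) (q ++ [a]) (c + 1)
      refine ⟨by rw [i1, pvMark_length], ?_, ?_, ?_, ?_, ?_, ?_, ?_⟩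
      · intro x hx; exact i2 x (mkP_mark_mono v a x hx)
      · intro y hy hy0 hylt
        rcases List.mem_cons.mp hy with rfl | hy'
        · exact i2 y (mkP_mark_self v y hy0 hylt)
        · exact i3 y hy' hy0 (by rwa [pvMark_length])
      · intro y hy; exact i4 y (List.mem_append_left _ hy)
      · intro y hy
        rcases i5 y hy with h | h
        · rcases List.mem_append.mp h with h' | h'
          · exact Or.inl h'
          · simp at h'; rw [h']; exact Or.inr (List.mem_cons_self)
        · exact Or.inr (List.mem_cons_of_mem a h)
      · intro hq y hy
        apply i6 _ y hy
        intro z hz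
        rcases List.mem_append.mp hz with h' | h'
        · exact mkP_mark_mono v a z (hq z h')
        · simp at h'; rw [h']; exact mkP_mark_self v a h0 hlt
      · intro x hx
        rcases i7 x hx with h | h
        · rcases mkP_mark_inv v a x h with h' | h'
          · exact Or.inl h'
          · subst h'
            exact Or.inr (i4 x (List.mem_append_right _ (List.mem_singleton.mpr rfl)))
        · exact Or.inr h
      · intro hc
        apply i8
        rw [count_true_mark v a hs, hc]
        push_cast
        ring

-- A's queue loop: from an invariant state with count = #marked, the result is
-- #marked of a visited array characterised by reachability
theorem loopA_final (g : List (Int × List Int)) (n : Int) (hadj : AdjOK g n) :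
    ∀ (v : List Bool) (q : List Int) (c : Int), INV g n v q → c = (v.count true : Int) →
      ∃ v', FinalChar g n v' ∧ bfsLoop g v q c = (v'.count true : Int) := by
  intro v q c
  induction v, q, c using bfsLoop.induct g with
  | case1 v c =>
    intro hinv hc
    refine ⟨v, ⟨hinv.1, fun x => ⟨hinv.2.2.1 x, ?_⟩⟩, by simpa [bfsLoop]⟩
    intro hr
    induction hr with
    | refl => exact hinv.2.2.2.2
    | tail _ hstep ih2 =>
      rename_i b c' _
      exact hinv.2.2.2.1 b ih2 (by simp) c' hstep
  | case2 visited cur rest count s ih =>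
    intro hinv hc
    obtain ⟨hlen, hwork, hreach, hclosed, hone⟩ := hinv
    obtain ⟨f1, f2, f3, f4, f5, f6, f7, f8⟩ := foldA_spec (pvAdj g cur) visited rest count
    have hcur : MkP visited cur := hwork cur (by simp)
    have hreach_cur : ReachP g cur := hreach cur hcur
    have hinv' : INV g n s.1 s.2.1 := by
      refine ⟨by rw [show s.1 = (List.foldl bfsStep (visited, rest, count) (pvAdj g cur)).1 from rfl] at *; rw [f1, hlen], ?_, ?_, ?_, ?_⟩
      · exact f6 (fun y hy => hwork y (List.mem_cons_of_mem cur hy))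
      · intro x hx
        rcases f7 x hx with h | h
        · exact hreach x h
        · rcases f5 x h with h' | h'
          · exact hreach x (hwork x (List.mem_cons_of_mem cur h'))
          · exact Relation.ReflTransGen.tail hreach_cur h'
      · intro x hx hxq y hy
        rcases f7 x hx with h | h
        · by_cases hxc : x = cur
          · have hy' : y ∈ pvAdj g cur := hxc ▸ hy
            have hr := hadj cur hreach_cur y hy'
            exact f3 y hy' hr.1 (by rw [hlen]; omega)
          · have hxrest : x ∉ rest := fun hm => hxq (f4 x hm)
            have : x ∉ cur :: rest := by
              intro hm; rcases List.mem_cons.mp hm with h' | h'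
              · exact hxc h'
              · exact hxrest h'
            exact f2 y (hclosed x h this y hy)
        · exact absurd h hxq
      · exact f2 1 hone
    have hcount' : s.2.2 = (s.1.count true : Int) := f8 hc
    obtain ⟨v', hchar, heq⟩ := ih hinv' hcount'
    refine ⟨v', hchar, ?_⟩
    rw [bfsLoop]
    exact heq

-- ---------- B-side lemmas ----------

-- the double fold of bRound is a single fold over the flattened adjacency lists
theorem bRound_eq (g : List (Int × List Int)) :
    ∀ (frontier : List Int) (s : List Int × List Int),
      frontier.foldl (fun s u => (pvAdj g u).foldl bStepV s) s
        = (frontier.flatMap (pvAdj g)).foldl bStepV s := by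
  intro frontier
  induction frontier with
  | nil => intro s; simp
  | cons u t ih =>
    intro s
    rw [List.foldl_cons, List.flatMap_cons, List.foldl_append]
    exact ih _

-- both components of the fold grow by the same suffix of fresh elements
theorem bfold_main :
    ∀ (L : List Int) (r nx : List Int), (∀ a ∈ nx, a ∈ r) →
      ∃ e, L.foldl bStepV (r, nx) = (r ++ e, nx ++ e) := by
  intro L
  induction L with
  | nil => intro r nx _; exact ⟨[], by simp⟩
  | cons v t ih =>
    intro r nx hsub
    rw [List.foldl_cons]
    by_cases hc : v ∈ r
    · have hstep : bStepV (r, nx) v = (r, nx) := by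
        simp [bStepV, PySem.Set.contains, hc]
      rw [hstep]
      exact ih r nx hsub
    · have hvn : v ∉ nx := fun hm => hc (hsub v hm)
      have hstep : bStepV (r, nx) v = (r ++ [v], nx ++ [v]) := by
        simp [bStepV, PySem.Set.add, PySem.Set.contains, hc, hvn]
      rw [hstep]
      obtain ⟨e, he⟩ := ih (r ++ [v]) (nx ++ [v])
        (by intro a ha
            rcases List.mem_append.mp ha with h | h
            · exact List.mem_append_left _ (hsub a h)
            · exact List.mem_append_right _ h)
      exact ⟨v :: e, by rw [he]; simp⟩

theorem bfold_nodup :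
    ∀ (L : List Int) (s : List Int × List Int), s.1.Nodup → (L.foldl bStepV s).1.Nodup := by
  intro L
  induction L with
  | nil => intro s h; simpa using h
  | cons v t ih =>
    intro s h
    rw [List.foldl_cons]
    apply ih
    unfold bStepV
    split
    · exact h
    · rename_i hc
      have hv : v ∉ s.1 := fun hm => hc (by simpa [PySem.Set.contains] using hm)
      simp [PySem.Set.add, PySem.Set.contains, hv, List.nodup_append, h]
      exact fun a ha hax => hv (hax ▸ ha)

theorem bfold_mono :
    ∀ (L : List Int) (s : List Int × List Int) (a : Int), a ∈ s.1 → a ∈ (L.foldl bStepV s).1 := by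
  intro L
  induction L with
  | nil => intro s a h; simpa using h
  | cons v t ih =>
    intro s a h
    rw [List.foldl_cons]
    apply ih
    unfold bStepV
    split
    · exact h
    · simp [PySem.Set.mem_add, h]

theorem bfold_covers :
    ∀ (L : List Int) (s : List Int × List Int), ∀ v ∈ L, v ∈ (L.foldl bStepV s).1 := by
  intro L
  induction L with
  | nil => intro s v h; simp at h
  | cons u t ih =>
    intro s v hv
    rcases List.mem_cons.mp hv with rfl | hv'
    · rw [List.foldl_cons]
      apply bfold_mono
      unfold bStepV
      split
      · rename_i hc; simpa [PySem.Set.contains] using hc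
      · rename_i hc
        have : v ∉ s.1 := fun hm => hc (by simpa [PySem.Set.contains] using hm)
        simp [PySem.Set.add, PySem.Set.contains, this]
    · rw [List.foldl_cons]
      exact ih _ v hv'

theorem bfold_down :
    ∀ (L : List Int) (s : List Int × List Int) (z : Int),
      z ∈ (L.foldl bStepV s).1 → z ∈ s.1 ∨ z ∈ L := by
  intro L
  induction L with
  | nil => intro s z h; exact Or.inl (by simpa using h)
  | cons v t ih =>
    intro s z h
    rw [List.foldl_cons] at h
    rcases ih _ z h with h' | h'
    · by_cases hc : v ∈ s.1
      · rw [show bStepV s v = s from by simp [bStepV, PySem.Set.contains, hc]] at h'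
        exact Or.inl h'
      · rw [show bStepV s v = (PySem.Set.add s.1 v, PySem.Set.add s.2 v) from by
          simp [bStepV, PySem.Set.contains, hc]] at h'
        rcases (by simpa [PySem.Set.mem_add] using h' : z ∈ s.1 ∨ z = v) with h'' | h''
        · exact Or.inl h''
        · exact Or.inr (h'' ▸ List.mem_cons_self)
    · exact Or.inr (List.mem_cons_of_mem _ h')

-- invariant for B's frontier loop
def INVB (g : List (Int × List Int)) (reach frontier : List Int) : Prop :=
  reach.Nodup
  ∧ (∀ x ∈ frontier, x ∈ reach)
  ∧ (∀ x ∈ reach, ReachP g x)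
  ∧ (∀ x ∈ reach, x ∉ frontier → ∀ y ∈ pvAdj g x, y ∈ reach)
  ∧ (1 : Int) ∈ reach
  ∧ (∀ x ∈ reach, x ∈ (1 : Int) :: g.flatMap (fun p => p.2))

theorem bLoop_nil (g : List (Int × List Int)) :
    ∀ (fuel : Nat) (reach : List Int), bLoop g fuel reach [] = reach := by
  intro fuel reach
  cases fuel <;> simp [bLoop]

-- a closed reach set (all members' neighbours inside) is exactly the reachable set
theorem closed_char (g : List (Int × List Int)) (reach : List Int)
    (hone : (1 : Int) ∈ reach)
    (hreach : ∀ x ∈ reach, ReachP g x)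
    (hclosed : ∀ x ∈ reach, ∀ y ∈ pvAdj g x, y ∈ reach) :
    ∀ x, x ∈ reach ↔ ReachP g x := by
  intro x
  constructor
  · exact hreach x
  · intro hr
    induction hr with
    | refl => exact hone
    | tail _ hstep ih => exact hclosed _ ih _ hstep

theorem loopB_final (g : List (Int × List Int)) :
    ∀ (fuel : Nat) (reach frontier : List Int), INVB g reach frontier →
      ((1 : Int) :: g.flatMap (fun p => p.2)).length + 2 ≤ fuel + reach.length →
      (bLoop g fuel reach frontier).Nodup
        ∧ ∀ x, x ∈ bLoop g fuel reach frontier ↔ ReachP g x := by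
  intro fuel
  induction fuel with
  | zero =>
    intro reach frontier hinv hfuel
    exfalso
    have hle := (hinv.1.subperm (fun z hz => hinv.2.2.2.2.2 z hz)).length_le
    omega
  | succ fuel ih =>
    intro reach frontier hinv hfuel
    obtain ⟨hnd, hfr, hre, hcl, hone, huniv⟩ := hinv
    by_cases hfe : frontier = []
    · subst hfe
      rw [show bLoop g (fuel + 1) reach [] = reach from bLoop_nil g _ _]
      exact ⟨hnd, closed_char g reach hone hre (fun x hx => hcl x hx (by simp))⟩
    · have hunf : bLoop g (fuel + 1) reach frontier
          = bLoop g fuel (bRound g reach frontier).1 (bRound g reach frontier).2 := by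
        rw [bLoop, if_neg hfe]
      have hround : bRound g reach frontier
          = (frontier.flatMap (pvAdj g)).foldl bStepV (reach, []) := by
        unfold bRound; exact bRound_eq g frontier (reach, [])
      set L := frontier.flatMap (pvAdj g) with hL
      obtain ⟨e, he⟩ := bfold_main L reach [] (by simp)
      rw [hround, he] at hunf
      simp only [List.nil_append] at hunf
      have hLmem : ∀ y ∈ L, ∃ u ∈ frontier, y ∈ pvAdj g u := by
        intro y hy
        exact List.mem_flatMap.mp hy
      have hcov : ∀ y ∈ L, y ∈ reach ++ e := by
        intro y hy
        have := bfold_covers L (reach, []) y hy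
        rw [he] at this
        simpa using this
      have hdown : ∀ z ∈ reach ++ e, z ∈ reach ∨ z ∈ L := by
        intro z hz
        have : z ∈ (L.foldl bStepV (reach, [])).1 := by rw [he]; simpa using hz
        simpa using bfold_down L (reach, []) z this
      have hnd' : (reach ++ e).Nodup := by
        have := bfold_nodup L (reach, []) hnd
        rw [he] at this
        simpa using this
      have hre' : ∀ x ∈ reach ++ e, ReachP g x := by
        intro x hx
        rcases hdown x hx with h | h
        · exact hre x h
        · obtain ⟨u, hu, hxu⟩ := hLmem x h
          exact Relation.ReflTransGen.tail (hre u (hfr u hu)) hxu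
      cases he0 : e with
      | nil =>
        subst he0
        simp only [List.append_nil] at hunf hnd' hre' hcov
        rw [hunf, bLoop_nil g]
        refine ⟨hnd, closed_char g reach hone hre ?_⟩
        intro x hx y hy
        by_cases hxf : x ∈ frontier
        · exact hcov y (List.mem_flatMap.mpr ⟨x, hxf, hy⟩)
        · exact hcl x hx hxf y hy
      | cons v0 e0 =>
        rw [hunf]
        apply ih
        · refine ⟨hnd', ?_, hre', ?_, List.mem_append_left _ hone, ?_⟩
          · intro x hx; exact List.mem_append_right _ hx
          · intro x hx hxe y hy
            have hxr : x ∈ reach := by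
              rcases List.mem_append.mp hx with h | h
              · exact h
              · exact absurd h hxe
            by_cases hxf : x ∈ frontier
            · exact hcov y (List.mem_flatMap.mpr ⟨x, hxf, hy⟩)
            · exact List.mem_append_left _ (hcl x hxr hxf y hy)
          · intro x hx
            rcases hdown x hx with h | h
            · exact huniv x h
            · obtain ⟨u, _, hxu⟩ := hLmem x h
              exact List.mem_cons_of_mem _ (adj_sub_flat g u x hxu)
        · have : 1 ≤ e.length := by rw [he0]; simp
          simp only [List.length_append]
          omega

-- ---------- counting: #true entries of the final array = size of the reachable set ----------

theorem count_true_eq_filter_range (v : List Bool) :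
    v.count true = ((List.range v.length).filter (fun i => v.getD i false)).length := by
  induction v using List.reverseRecOn with
  | nil => simp
  | append_singleton t b ih =>
    rw [List.count_append, List.length_append, List.length_singleton, List.range_succ,
      List.filter_append]
    have hcong : (List.range t.length).filter (fun i => (t ++ [b]).getD i false)
        = (List.range t.length).filter (fun i => t.getD i false) := by
      apply List.filter_congr
      intro i hi
      have hilt : i < t.length := List.mem_range.mp hi
      simp [List.getD_eq_getElem?_getD, List.getElem?_append_left hilt]
    have hlast : (t ++ [b]).getD t.length false = b := by
      simp [List.getD_eq_getElem?_getD]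
    rw [hcong, List.length_append, ih]
    cases b <;> simp [List.filter, hlast]

-- the marked indices of v as a list of Ints
def mkList (v : List Bool) : List Int :=
  ((List.range v.length).filter (fun i => v.getD i false)).map Int.ofNat

theorem mkList_length (v : List Bool) : (mkList v).length = v.count true := by
  rw [mkList, List.length_map, count_true_eq_filter_range]

theorem mkList_nodup (v : List Bool) : (mkList v).Nodup := by
  apply List.Nodup.map
  · intro a b h; exact Int.ofNat.inj h
  · exact (List.nodup_range).filter _

theorem mkList_mem (v : List Bool) (z : Int) : z ∈ mkList v ↔ MkP v z := by
  unfold mkList MkP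
  constructor
  · intro h
    obtain ⟨i, hi, rfl⟩ := List.mem_map.mp h
    have h2 := List.mem_filter.mp hi
    have hlt := List.mem_range.mp h2.1
    exact ⟨Int.natCast_nonneg i, by simpa using hlt, by simpa using h2.2⟩
  · intro ⟨h0, hlt, hval⟩
    apply List.mem_map.mpr
    refine ⟨z.toNat, List.mem_filter.mpr ⟨List.mem_range.mpr hlt, by simpa using hval⟩, ?_⟩
    exact Int.toNat_of_nonneg h0

-- two nodup lists with the same members have the same length
theorem length_eq_of_nodup_same_mem (l₁ l₂ : List Int)
    (h₁ : l₁.Nodup) (h₂ : l₂.Nodup) (hm : ∀ x, x ∈ l₁ ↔ x ∈ l₂) :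
    l₁.length = l₂.length := by
  have a1 := (h₁.subperm (fun x hx => (hm x).mp hx)).length_le
  have a2 := (h₂.subperm (fun x hx => (hm x).mpr hx)).length_le
  omega

-- the common initial state of A satisfies A's invariant
theorem init_inv (g : List (Int × List Int)) (n : Int) (hn : 1 ≤ n) :
    INV g n (pvMark (List.replicate (n + 1).toNat false) 1) [1] := by
  set v0 := List.replicate (n + 1).toNat false with hv0
  have hlen : v0.length = (n + 1).toNat := by simp [hv0]
  have hlt : (1 : Int).toNat < v0.length := by rw [hlen]; omega
  have hrep : ∀ x : Int, ¬ MkP v0 x := by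
    intro x ⟨_, hx, hval⟩
    rw [List.getD_eq_getElem?_getD, List.getElem?_eq_getElem hx] at hval
    simp [hv0] at hval
  refine ⟨by rw [pvMark_length, hlen], ?_, ?_, ?_, ?_⟩
  · intro y hy; simp at hy; subst hy
    exact mkP_mark_self v0 1 (by norm_num) hlt
  · intro x hx
    rcases mkP_mark_inv v0 1 x hx with h | h
    · exact absurd h (hrep x)
    · subst h; exact Relation.ReflTransGen.refl
  · intro x hx hxq
    rcases mkP_mark_inv v0 1 x hx with h | h
    · exact absurd h (hrep x)
    · subst h; simp at hxq
  · exact mkP_mark_self v0 1 (by norm_num) hlt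

theorem init_count (n : Int) (hn : 1 ≤ n) :
    ((pvMark (List.replicate (n + 1).toNat false) 1).count true : Int) = 1 := by
  have hlt : (1 : Int).toNat < (List.replicate (n + 1).toNat (false : Bool)).length := by
    simp; omega
  have hs : pvSeen (List.replicate (n + 1).toNat false) 1 = false := by
    unfold pvSeen
    rw [dif_pos ⟨by norm_num, hlt⟩]
    simp
  rw [count_true_mark _ _ hs]
  have : (List.replicate (n + 1).toNat (false : Bool)).count true = 0 := by
    rw [List.count_eq_zero]
    simp
  rw [this]
  norm_num

theorem initB_inv (g : List (Int × List Int)) : INVB g [1] [1] := by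
  refine ⟨by simp, by simp, ?_, ?_, by simp, by simp⟩
  · intro x hx; simp at hx; subst hx; exact Relation.ReflTransGen.refl
  · intro x hx hxf; simp at hx; simp [hx] at hxf

-- ===== VERDICT (by name: the statement is the Claim_ definition above) =====
theorem bfs_spec : Claim_equal_bfs := by
  intro graph n _ hpre
  unfold Spec_bfs
  have hA : bfs graph n
      = bfsLoop graph (pvMark (List.replicate (n + 1).toNat false) 1) [1] 1 := rfl
  have hB : bfs_alt graph n
      = ((bLoop graph ((graph.flatMap (fun p => p.2)).length + 2) [1] [1]).length : Int) := rfl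
  rw [hA, hB]
  have hadj := pre_adjOK graph n hpre
  obtain ⟨vA, hcharA, heqA⟩ :=
    loopA_final graph n hadj _ [1] 1 (init_inv graph n hpre.1) (init_count n hpre.1).symm
  obtain ⟨hndB, hmemB⟩ := loopB_final graph ((graph.flatMap (fun p => p.2)).length + 2) [1] [1]
    (initB_inv graph) (by simp)
  rw [heqA]
  have hcount : vA.count true
      = (bLoop graph ((graph.flatMap (fun p => p.2)).length + 2) [1] [1]).length := by
    rw [← mkList_length vA]
    apply length_eq_of_nodup_same_mem _ _ (mkList_nodup vA) hndB
    intro x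
    rw [mkList_mem, hcharA.2 x, hmemB x]
  exact_mod_cast hcount
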